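-- pv_equiv track=rewrite | github.com/krangelov/rgl-learner | paradigm_extraction/learn_paradigms.py | longest_variable
-- ===== SOURCE A (Python) =====
-- def longest_variable(string):
--     thislen = 0
--     maxlen = 0
--     inside = 0
--     for s in string:
--         if inside and s != u']':
--             thislen += 1
--         elif s == u']':
--             inside = 0
--             maxlen = max(thislen, maxlen)
--         elif s == u'[':
--             inside = 1
--             thislen = 0
--     return maxlen
-- ===== SOURCE B (Python) =====
-- def longest_variable(string):
--     pieces = string.split(']')
--     return max((len(p) - 1 - p.find('[') for p in pieces[:-1] if '[' in p),
--                default=0)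
-- ===== Notes on version B (the rewrite author's own statement) =====
-- stated objective: alternative
-- what changed: Replaced the per-character inside/thislen/maxlen state machine with staged library passes: split the string on the closing bracket and take the max (default 0) over the non-final pieces containing an opening bracket of len(piece)-1-piece.find of that bracket, with no explicit character loop or state.
import Mathlib
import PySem

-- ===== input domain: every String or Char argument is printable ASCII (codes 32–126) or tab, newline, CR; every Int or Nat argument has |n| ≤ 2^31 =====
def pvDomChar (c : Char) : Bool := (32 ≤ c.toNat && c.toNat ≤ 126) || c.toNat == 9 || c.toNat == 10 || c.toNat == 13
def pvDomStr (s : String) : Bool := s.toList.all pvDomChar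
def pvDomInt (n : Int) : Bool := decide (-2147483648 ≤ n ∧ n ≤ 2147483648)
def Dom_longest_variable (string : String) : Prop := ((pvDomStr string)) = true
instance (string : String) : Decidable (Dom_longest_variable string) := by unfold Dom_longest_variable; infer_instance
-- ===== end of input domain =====

-- B replaces A's per-character inside/thislen state machine by staged library passes: split the
-- string on ']', then take the max over the non-final pieces containing '[' of the length after
-- the first '['. Same O(n); a timing run measured B faster (the scan runs in C library code).

-- ===== PORT A =====
-- per-char state (thislen, maxlen, inside), inside kept as an Int 0/1 as in Python
def pvStepA (st : Int × Int × Int) (s : Char) : Int × Int × Int :=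
  if st.2.2 ≠ 0 ∧ s ≠ ']' then (st.1 + 1, st.2.1, st.2.2)
  else if s = ']' then (st.1, max st.1 st.2.1, 0)
  else if s = '[' then (0, st.2.1, 1)
  else st

def longest_variable (string : String) : Int :=
  (string.toList.foldl pvStepA (0, 0, 0)).2.1

-- ===== PORT B =====
-- exact hand port of str.split(']') (single-character separator; the result is never empty)
def pySplitRB : List Char → List (List Char)
  | [] => [[]]
  | c :: rest =>
      if c = ']' then [] :: pySplitRB rest
      else
        match pySplitRB rest with
        | [] => [[c]]
        | p :: ps => (c :: p) :: ps

-- exact hand port of p.find('[') for the single-character needle: first index, or -1 if absent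
def pyFindLB : List Char → Int
  | [] => -1
  | c :: p => if c = '[' then 0 else if pyFindLB p = -1 then -1 else pyFindLB p + 1

-- max((len(p) - 1 - p.find('[') for p in pieces[:-1] if '[' in p), default=0)
def longest_variable_alt (string : String) : Int :=
  (((pySplitRB string.toList).dropLast.filter (fun p => '[' ∈ p)).map
      (fun p => (p.length : Int) - 1 - pyFindLB p)).foldl max 0

-- ===== PRECONDITION & SPEC =====
def Spec_longest_variable (string : String) (out : Int) : Prop := out = longest_variable_alt string
instance (string : String) (out : Int) : Decidable (Spec_longest_variable string out) := by unfold Spec_longest_variable; infer_instance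

-- ===== CLAIM =====
def Claim_equal_longest_variable : Prop := ∀ (string : String), Dom_longest_variable string → Spec_longest_variable string (longest_variable string)

-- ===== LEMMAS AND PROOFS =====

-- the per-piece contributions B folds max over, when starting outside a bracket …
def pvSOf (ps : List (List Char)) : List Int :=
  (ps.dropLast.filter (fun p => '[' ∈ p)).map (fun p => (p.length : Int) - 1 - pyFindLB p)

-- … and when already inside one, count characters counted so far (the open span closes with the first piece)
def pvBOf (count : Int) : List (List Char) → List Int
  | [] => []
  | [_] => []
  | P :: ps => (count + (P.length : Int)) :: pvSOf ps

theorem pySplitRB_ne_nil (l : List Char) : pySplitRB l ≠ [] := by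
  cases l with
  | nil => simp [pySplitRB]
  | cons c rest =>
    simp only [pySplitRB]
    split_ifs
    · simp
    · cases h : pySplitRB rest <;> simp

theorem pyFindLB_nonneg_or (p : List Char) : pyFindLB p = -1 ∨ 0 ≤ pyFindLB p := by
  induction p with
  | nil => simp [pyFindLB]
  | cons c q ih =>
    simp only [pyFindLB]
    split_ifs with h1 h2
    · omega
    · omega
    · omega

theorem pyFindLB_ne_neg_one (p : List Char) (h : '[' ∈ p) : pyFindLB p ≠ -1 := by
  induction p with
  | nil => simp at h
  | cons c q ih =>
    simp only [pyFindLB]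
    split_ifs with h1 h2
    · omega
    · have hq : '[' ∈ q := by
        cases List.mem_cons.mp h with
        | inl e => exact absurd e.symm h1
        | inr m => exact m
      exact absurd h2 (ih hq)
    · rcases pyFindLB_nonneg_or q with h3 | h3 <;> omega

-- a leading non-bracket character shifts the found index by one
theorem pyFindLB_cons (c : Char) (P : List Char) (hc : ¬ c = '[') (hP : '[' ∈ P) :
    pyFindLB (c :: P) = pyFindLB P + 1 := by
  simp only [pyFindLB, hc, if_false, if_neg (pyFindLB_ne_neg_one P hP)]

-- Invariant: outside a bracket A carries a stale thislen ≤ maxlen (so a stray ']' never raises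
-- maxlen) and the rest of the fold is the max over pvSOf of the remaining split pieces; inside,
-- it is the max over pvBOf with the running count.
theorem pvMain :
    ∀ (l : List Char) (thislen maxlen : Int),
      (thislen ≤ maxlen →
        (l.foldl pvStepA (thislen, maxlen, 0)).2.1 = (pvSOf (pySplitRB l)).foldl max maxlen)
      ∧ ((l.foldl pvStepA (thislen, maxlen, 1)).2.1 = (pvBOf thislen (pySplitRB l)).foldl max maxlen) := by
  intro l
  induction l with
  | nil => intro thislen maxlen; simp [pySplitRB, pvSOf, pvBOf]
  | cons c rest ih =>
    intro thislen maxlen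
    constructor
    · intro hle
      by_cases hb : c = ']'
      · subst hb
        have hstep : pvStepA (thislen, maxlen, 0) ']' = (thislen, max thislen maxlen, 0) := by
          simp [pvStepA]
        rw [List.foldl_cons, hstep, max_eq_right hle, (ih thislen maxlen).1 hle]
        cases h : pySplitRB rest with
        | nil => exact absurd h (pySplitRB_ne_nil rest)
        | cons P ps =>
          have hsp : pySplitRB (']' :: rest) = [] :: P :: ps := by simp [pySplitRB, h]
          simp [hsp, pvSOf]
      · by_cases ho : c = '['
        · subst ho
          have hstep : pvStepA (thislen, maxlen, 0) '[' = (0, maxlen, 1) := by simp [pvStepA]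
          rw [List.foldl_cons, hstep, (ih 0 maxlen).2]
          cases h : pySplitRB rest with
          | nil => exact absurd h (pySplitRB_ne_nil rest)
          | cons P ps =>
            have hsp : pySplitRB ('[' :: rest) = ('[' :: P) :: ps := by simp [pySplitRB, h]
            cases ps with
            | nil => simp [hsp, pvSOf, pvBOf]
            | cons Q qs => simp [hsp, pvSOf, pvBOf, pyFindLB]
        · have hstep : pvStepA (thislen, maxlen, 0) c = (thislen, maxlen, 0) := by
            simp [pvStepA, hb, ho]
          rw [List.foldl_cons, hstep, (ih thislen maxlen).1 hle]
          cases h : pySplitRB rest with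
          | nil => exact absurd h (pySplitRB_ne_nil rest)
          | cons P ps =>
            have hsp : pySplitRB (c :: rest) = (c :: P) :: ps := by simp [pySplitRB, h, hb]
            have hcc : ¬ ('[' = c) := fun e => ho e.symm
            cases ps with
            | nil => simp [hsp, pvSOf]
            | cons Q qs =>
              by_cases hm : '[' ∈ P
              · simp [hsp, pvSOf, hm, hcc, pyFindLB_cons c P ho hm]
                ring_nf
              · simp [hsp, pvSOf, hm, hcc]
    · by_cases hb : c = ']'
      · subst hb
        have hstep : pvStepA (thislen, maxlen, 1) ']' = (thislen, max thislen maxlen, 0) := by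
          simp [pvStepA]
        have hle : thislen ≤ max thislen maxlen := le_max_left _ _
        rw [List.foldl_cons, hstep, (ih thislen (max thislen maxlen)).1 hle]
        cases h : pySplitRB rest with
        | nil => exact absurd h (pySplitRB_ne_nil rest)
        | cons P ps =>
          have hsp : pySplitRB (']' :: rest) = [] :: P :: ps := by simp [pySplitRB, h]
          rw [hsp]
          simp only [pvBOf, List.foldl_cons, List.length_nil, Nat.cast_zero, add_zero]
          rw [max_comm maxlen thislen]
      · have hstep : pvStepA (thislen, maxlen, 1) c = (thislen + 1, maxlen, 1) := by
          simp [pvStepA, hb]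
        rw [List.foldl_cons, hstep, (ih (thislen + 1) maxlen).2]
        cases h : pySplitRB rest with
        | nil => exact absurd h (pySplitRB_ne_nil rest)
        | cons P ps =>
          have hsp : pySplitRB (c :: rest) = (c :: P) :: ps := by simp [pySplitRB, h, hb]
          rw [hsp]
          cases ps with
          | nil => simp [pvBOf]
          | cons Q qs =>
            simp only [pvBOf, List.foldl_cons, List.length_cons]
            push_cast
            ring_nf

-- ===== VERDICT =====
theorem longest_variable_spec : Claim_equal_longest_variable := by
  intro string _
  unfold Spec_longest_variable longest_variable longest_variable_alt
  have := (pvMain string.toList 0 0).1 le_rfl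
  rw [this]
  rfl
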